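-- pv_equiv track=rewrite | github.com/Upwardh/gitops-k2p | my-k8s-project/lb-exporter/kclutil.py | validate_duplicate_two_keys
-- ===== SOURCE A (Python) =====
-- from collections import Counter, defaultdict
--
-- def validate_duplicate_two_keys(dict_list, key1, key2):
--     # 중복된 항목 찾기
--     duplicates = defaultdict(list)
--
--     for item in dict_list:
--         key_pair = (item[key1], item[key2])  # (name, age) 조합을 키로 사용
--         duplicates[key_pair].append(item)
--
--     for key_pair, items in duplicates.items():
--         if len(items) > 1:
--             msg = f"{key_pair}: {key1}, {key2} 정보가 중복됩니다."
--             return False, msg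
--
--     return True, ""
-- ===== SOURCE B (Python) =====
-- def validate_duplicate_two_keys(dict_list, key1, key2):
--     n = len(dict_list)
--     for i in range(n):
--         key_pair = (dict_list[i][key1], dict_list[i][key2])
--         for j in range(n):
--             if j != i and (dict_list[j][key1], dict_list[j][key2]) == key_pair:
--                 msg = f"{key_pair}: {key1}, {key2} 정보가 중복됩니다."
--                 return False, msg
--     return True, ""
-- ===== Notes on version B (the rewrite author's own statement) =====
-- stated objective: alternative
-- what changed: Replaces A's hash-grouping (a defaultdict mapping each (key1,key2) pair to its list of items, then a scan of that grouping table) by a brute-force O(n^2) pairwise index scan that uses no auxiliary data structure: for each index i in order, an inner loop looks for another index j with the same pair.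
import Mathlib
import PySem

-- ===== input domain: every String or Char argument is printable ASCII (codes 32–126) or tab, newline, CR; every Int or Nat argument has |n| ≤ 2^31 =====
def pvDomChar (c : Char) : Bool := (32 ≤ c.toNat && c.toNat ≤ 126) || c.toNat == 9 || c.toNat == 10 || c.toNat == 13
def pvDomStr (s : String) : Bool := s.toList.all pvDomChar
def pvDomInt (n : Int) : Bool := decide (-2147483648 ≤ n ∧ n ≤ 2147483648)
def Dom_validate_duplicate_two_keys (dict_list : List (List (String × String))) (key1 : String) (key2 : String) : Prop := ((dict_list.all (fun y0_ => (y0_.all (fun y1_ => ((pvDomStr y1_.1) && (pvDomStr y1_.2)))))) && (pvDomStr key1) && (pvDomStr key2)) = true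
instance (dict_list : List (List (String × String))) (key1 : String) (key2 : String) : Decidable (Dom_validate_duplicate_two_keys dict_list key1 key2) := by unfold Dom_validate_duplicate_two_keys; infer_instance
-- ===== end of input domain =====

-- B replaces A's hash-grouping (defaultdict of item lists, then a scan of the grouping table) by a
-- brute-force O(n^2) pairwise index scan with no auxiliary table at all (alternative; same result).

-- Shared helpers (identical expressions occur in both Python sources):
-- item[key]: dict lookup = first match in the association list (`none` = KeyError, excluded by Pre_)
def pyItem (item : List (String × String)) (k : String) : String := (item.lookup k).getD ""
-- key_pair = (item[key1], item[key2])
def pairOf (key1 key2 : String) (item : List (String × String)) : String × String :=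
  (pyItem item key1, pyItem item key2)
-- Python repr of a str (exact on the Dom alphabet: printable ASCII plus tab/newline/CR)
def pyEsc (q : Char) (c : Char) : List Char :=
  if c = '\\' then ['\\', '\\']
  else if c = q then ['\\', q]
  else if c = '\t' then ['\\', 't']
  else if c = '\n' then ['\\', 'n']
  else if c = '\r' then ['\\', 'r']
  else [c]
def pyRepr (s : String) : List Char :=
  let cs := s.toList
  let q := if cs.contains '\'' && !cs.contains '"' then '"' else '\''
  q :: cs.flatMap (pyEsc q) ++ [q]
-- f"{key_pair}: {key1}, {key2} 정보가 중복됩니다."  (str of a 2-tuple of strs)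
def dupMsg (key1 key2 : String) (p : String × String) : String :=
  String.ofList ('(' :: pyRepr p.1 ++ ',' :: ' ' :: pyRepr p.2 ++ ')' :: ':' :: ' ' :: key1.toList
                 ++ ',' :: ' ' :: key2.toList ++ " 정보가 중복됩니다.".toList)

-- ===== PORT A =====
def validate_duplicate_two_keys (dict_list : List (List (String × String))) (key1 : String) (key2 : String) : Bool × String :=
  -- duplicates = defaultdict(list); for item in dict_list: duplicates[key_pair].append(item)
  let duplicates : PySem.Dict (String × String) (List (List (String × String))) :=
    dict_list.foldl (fun d item => d.modify (pairOf key1 key2 item) [] (fun l => l ++ [item])) PySem.Dict.empty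
  -- for key_pair, items in duplicates.items(): if len(items) > 1: return False, msg
  match duplicates.items.find? (fun e => decide (1 < e.2.length)) with
  | some e => (false, dupMsg key1 key2 e.1)
  | none => (true, "")

-- ===== PORT B =====
-- for i in range(n): key_pair = pair(dict_list[i]); for j in range(n): if j != i and pair(dict_list[j]) == key_pair: return False, msg
-- (dict_list[i] with 0 ≤ i < n is always in range, so `getD _ []` is exact here)
def validate_duplicate_two_keys_alt (dict_list : List (List (String × String))) (key1 : String) (key2 : String) : Bool × String :=
  let n := dict_list.length
  match (List.range n).find? (fun i =>
      (List.range n).any (fun j =>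
        decide (j ≠ i) && (pairOf key1 key2 (dict_list.getD j []) == pairOf key1 key2 (dict_list.getD i [])))) with
  | some i => (false, dupMsg key1 key2 (pairOf key1 key2 (dict_list.getD i [])))
  | none => (true, "")

-- ===== PRECONDITION & SPEC =====
-- Pre_ excludes exactly the inputs where the Python raises KeyError: an item missing key1 or key2.
def Pre_validate_duplicate_two_keys (dict_list : List (List (String × String))) (key1 : String) (key2 : String) : Prop :=
  ∀ item ∈ dict_list, (item.lookup key1).isSome ∧ (item.lookup key2).isSome
instance (dict_list : List (List (String × String))) (key1 : String) (key2 : String) : Decidable (Pre_validate_duplicate_two_keys dict_list key1 key2) := by unfold Pre_validate_duplicate_two_keys; infer_instance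
def pvWitness_validate_duplicate_two_keys : (List (List (String × String))) × String × String :=
  ([[("name", "kim"), ("age", "3")], [("name", "kim"), ("age", "3")]], "name", "age")
def Spec_validate_duplicate_two_keys (dict_list : List (List (String × String))) (key1 : String) (key2 : String) (out : Bool × String) : Prop := out = validate_duplicate_two_keys_alt dict_list key1 key2
instance (dict_list : List (List (String × String))) (key1 : String) (key2 : String) (out : Bool × String) : Decidable (Spec_validate_duplicate_two_keys dict_list key1 key2 out) := by unfold Spec_validate_duplicate_two_keys; infer_instance

-- ===== CLAIM (what is proved, stated in full; the proofs are below) =====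
def Claim_equal_validate_duplicate_two_keys : Prop := ∀ (dict_list : List (List (String × String))) (key1 : String) (key2 : String), Dom_validate_duplicate_two_keys dict_list key1 key2 → Pre_validate_duplicate_two_keys dict_list key1 key2 → Spec_validate_duplicate_two_keys dict_list key1 key2 (validate_duplicate_two_keys dict_list key1 key2)

-- ===== LEMMAS AND PROOFS =====

-- find? skips elements that fail the predicate, so filtering one such value away changes nothing.
theorem find?_skip {α : Type} [DecidableEq α] (P : α → Bool) (a : α) (hPa : P a = false)
    (c : α → Bool) (l : List α) :
    (l.filter (fun x => c x && !decide (x = a))).find? P = (l.filter c).find? P := by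
  induction l with
  | nil => rfl
  | cons x t ih =>
    by_cases hxa : x = a
    · subst hxa
      by_cases hc : c x <;> simp [hc, hPa, ih]
    · by_cases hc : c x <;> simp [hc, hxa, List.find?_cons, ih]

theorem find?_foldl_add {α : Type} [BEq α] [LawfulBEq α] [DecidableEq α] (P : α → Bool) (l : List α) :
    ∀ s : List α, (List.foldl PySem.Set.add s l).find? P
      = (s.find? P).or ((l.filter (fun y => !decide (y ∈ s))).find? P) := by
  induction l with
  | nil => intro s; simp
  | cons x t ih =>
    intro s
    by_cases hx : x ∈ s
    · have hadd : PySem.Set.add s x = s := by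
        rw [PySem.Set.add, PySem.Set.contains]; simp [hx]
      rw [List.foldl_cons, hadd, ih s, List.filter_cons]
      simp [hx]
    · have hadd : PySem.Set.add s x = s ++ [x] := by
        rw [PySem.Set.add, PySem.Set.contains]; simp [hx]
      rw [List.foldl_cons, hadd, ih (s ++ [x]), List.find?_append, List.filter_cons]
      have hfeq : (t.filter (fun y => !decide (y ∈ s ++ [x])))
          = t.filter (fun y => (!decide (y ∈ s)) && !decide (y = x)) := by
        apply List.filter_congr; intro y _; simp [List.mem_append]
      by_cases hPx : P x = true
      · simp [hx, hPx]
      · simp only [Bool.not_eq_true] at hPx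
        rw [hfeq, find?_skip P x hPx]
        simp [hx, hPx]

-- find? over set(xs) (first-insertion order) agrees with find? over xs itself.
theorem find?_ofList {α : Type} [BEq α] [LawfulBEq α] [DecidableEq α] (P : α → Bool) (l : List α) :
    (PySem.Set.ofList l).find? P = l.find? P := by
  rw [PySem.Set.ofList, PySem.Set.empty, find?_foldl_add P l []]
  simp

-- a dict with nodup keys is the map over its keys pairing each key with its stored value
theorem dict_items_eq_keys_map {κ ν : Type} [BEq κ] [LawfulBEq κ] (d : PySem.Dict κ ν) (d0 : ν)
    (h : d.keys.Nodup) : d.items = d.keys.map (fun k => (k, d.getD k d0)) := by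
  apply List.ext_getElem
  · simp [PySem.Dict.keys]
  · intro i h1 h2
    have hk : d.keys[i]'(by simpa [PySem.Dict.keys] using h1) = d.items[i].1 := by
      simp [PySem.Dict.keys]
    have hmem : (d.items[i].1, d.items[i].2) ∈ d.items := by
      simp only [Prod.mk.eta]
      exact List.getElem_mem h1
    have hg := PySem.Dict.getD_of_mem_items d hmem h d0
    simp only [List.getElem_map, hk, hg]

-- A's result, canonically: the first item of the list whose pair occurs more than once.
def canon (dl : List (List (String × String))) (k1 k2 : String) : Bool × String :=
  match dl.find? (fun item => decide (1 < (dl.map (pairOf k1 k2)).count (pairOf k1 k2 item))) with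
  | some item => (false, dupMsg k1 k2 (pairOf k1 k2 item))
  | none => (true, "")

theorem portA_eq_canon (dl : List (List (String × String))) (k1 k2 : String) :
    validate_duplicate_two_keys dl k1 k2 = canon dl k1 k2 := by
  have hfoldA : dl.foldl (fun d item => d.modify (pairOf k1 k2 item) [] (fun l => l ++ [item])) PySem.Dict.empty
      = (dl.map (fun it => (pairOf k1 k2 it, it))).foldl (fun d p => d.modify p.1 [] (fun l => l ++ [p.2])) PySem.Dict.empty := by
    rw [List.foldl_map]
  set D := dl.foldl (fun d item => d.modify (pairOf k1 k2 item) [] (fun l => l ++ [item])) PySem.Dict.empty with hD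
  have hkeys : D.keys = PySem.Set.ofList (dl.map (pairOf k1 k2)) := by
    rw [hD, PySem.Dict.keys_foldl_modify_key dl (pairOf k1 k2) [] (fun d x => fun l => l ++ [x]) PySem.Dict.empty]
    rfl
  have hnodup : D.keys.Nodup := by
    rw [hD]
    exact PySem.Dict.nodup_keys_foldl_modify_key dl (pairOf k1 k2) [] _ _ (by simp [pysem])
  have hgetD : ∀ c, D.getD c [] = dl.filter (fun it => pairOf k1 k2 it == c) := by
    intro c
    rw [hfoldA, PySem.Dict.getD_foldl_modify_append]
    rw [List.filter_map]
    simp [Function.comp_def]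
  have hitems : D.items = (PySem.Set.ofList (dl.map (pairOf k1 k2))).map
      (fun p => (p, dl.filter (fun it => pairOf k1 k2 it == p))) := by
    rw [dict_items_eq_keys_map D [] hnodup, hkeys]
    apply List.map_congr_left
    intro p _
    rw [hgetD p]
  have hpred : ∀ p : String × String, (decide (1 < (dl.filter (fun it => pairOf k1 k2 it == p)).length))
      = decide (1 < (dl.map (pairOf k1 k2)).count p) := by
    intro p
    congr 1
    rw [List.count, List.countP_map, ← List.countP_eq_length_filter]
    rfl
  show (match D.items.find? (fun e => decide (1 < e.2.length)) with
    | some e => (false, dupMsg k1 k2 e.1)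
    | none => (true, "")) = _
  rw [hitems, List.find?_map]
  have hQ : ((fun e : (String × String) × List (List (String × String)) => decide (1 < e.2.length))
      ∘ (fun p => (p, dl.filter (fun it => pairOf k1 k2 it == p))))
      = fun p => decide (1 < (dl.map (pairOf k1 k2)).count p) := by
    funext p; simp only [Function.comp_apply]; exact hpred p
  rw [hQ, find?_ofList, List.find?_map]
  unfold canon
  have hcp : (fun item => decide (1 < (dl.map (pairOf k1 k2)).count (pairOf k1 k2 item)))
      = ((fun p => decide (1 < (dl.map (pairOf k1 k2)).count p)) ∘ (pairOf k1 k2)) := rfl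
  rw [hcp]
  cases h : dl.find? ((fun p => decide (1 < (dl.map (pairOf k1 k2)).count p)) ∘ (pairOf k1 k2)) <;> simp

-- countP over the index range equals countP over the list itself.
theorem countP_range_getD {α : Type} (l : List α) (P : α → Bool) (d : α) :
    (List.range l.length).countP (fun j => P (l.getD j d)) = l.countP P := by
  induction l with
  | nil => simp
  | cons x t ih =>
    rw [List.length_cons, List.range_succ_eq_map, List.countP_cons, List.countP_map]
    have : ((fun j => P ((x :: t).getD j d)) ∘ (· + 1)) = fun j => P (t.getD j d) := by
      funext j; simp
    rw [this, ih, List.countP_cons]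
    simp

-- countP splits along a second boolean condition.
theorem countP_split {α : Type} (l : List α) (P Q : α → Bool) :
    l.countP P = l.countP (fun a => P a && Q a) + l.countP (fun a => P a && !Q a) := by
  induction l with
  | nil => simp
  | cons x t ih =>
    simp only [List.countP_cons, ih]
    cases hP : P x <;> cases hQ : Q x <;> simp <;> omega

-- the inner loop of B: "some other index carries the same pair" ⟺ the pair's count exceeds 1.
theorem any_ne_eq_count {α β : Type} [BEq β] [LawfulBEq β]
    (dl : List α) (f : α → β) (i : Nat) (hi : i < dl.length) (d : α) :
    ((List.range dl.length).any (fun j => decide (j ≠ i) && (f (dl.getD j d) == f (dl.getD i d))))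
      = decide (1 < (dl.map f).count (f (dl.getD i d))) := by
  have hcount : (List.range dl.length).countP (fun j => f (dl.getD j d) == f (dl.getD i d))
      = (dl.map f).count (f (dl.getD i d)) := by
    have h2 : (dl.map f).count (f (dl.getD i d)) = dl.countP (fun a => f a == f (dl.getD i d)) := by
      rw [List.count, List.countP_map]; rfl
    rw [h2]
    exact countP_range_getD dl (fun a => f a == f (dl.getD i d)) d
  have hsplit := countP_split (List.range dl.length)
    (fun j => f (dl.getD j d) == f (dl.getD i d)) (fun j => decide (j = i))
  have hone : (List.range dl.length).countP
      (fun j => (f (dl.getD j d) == f (dl.getD i d)) && decide (j = i)) = 1 := by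
    have hcg : ∀ j ∈ List.range dl.length,
        (((f (dl.getD j d) == f (dl.getD i d)) && decide (j = i)) = true ↔ (j == i) = true) := by
      intro j _
      constructor
      · intro h
        have := Bool.and_elim_right h
        simpa using this
      · intro h
        have hji : j = i := by simpa using h
        subst hji; simp
    rw [List.countP_congr hcg]
    show (List.range dl.length).count i = 1
    rw [List.count_range]
    simp [hi]
  have hcomm : ∀ j : Nat, ((f (dl.getD j d) == f (dl.getD i d)) && !decide (j = i))
      = (decide (j ≠ i) && (f (dl.getD j d) == f (dl.getD i d))) := by
    intro j; simp [Bool.and_comm, decide_not]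
  apply Bool.coe_iff_coe.mp
  rw [List.any_eq_true]
  constructor
  · rintro ⟨j, hjmem, hj⟩
    have hpos : 0 < (List.range dl.length).countP
        (fun j => (f (dl.getD j d) == f (dl.getD i d)) && !decide (j = i)) := by
      rw [List.countP_pos_iff]
      exact ⟨j, hjmem, by rw [hcomm j]; exact hj⟩
    simp only [decide_eq_true_eq]
    omega
  · intro h
    have h1 : 1 < (List.range dl.length).countP (fun j => f (dl.getD j d) == f (dl.getD i d)) := by
      rw [hcount]; exact of_decide_eq_true h
    rw [hsplit, hone] at h1
    have hpos : 0 < (List.range dl.length).countP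
        (fun j => (f (dl.getD j d) == f (dl.getD i d)) && !decide (j = i)) := by omega
    obtain ⟨j, hjmem, hj⟩ := List.countP_pos_iff.mp hpos
    exact ⟨j, hjmem, by rw [← hcomm j]; exact hj⟩

-- find? over indices, pushed back to find? over the list.
theorem find?_range_getD {α : Type} (l : List α) (q : α → Bool) (d : α) :
    ((List.range l.length).find? (fun i => q (l.getD i d))).map (fun i => l.getD i d) = l.find? q := by
  induction l with
  | nil => simp
  | cons x t ih =>
    rw [List.length_cons, List.range_succ_eq_map]
    cases hq : q x with
    | true =>
      rw [List.find?_cons_of_pos (by simpa using hq), List.find?_cons_of_pos hq]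
      simp
    | false =>
      rw [List.find?_cons_of_neg (by simp [hq]), List.find?_cons_of_neg (by simp [hq])]
      rw [List.find?_map, Option.map_map]
      have hfe : ((fun i => q ((x :: t).getD i d)) ∘ (· + 1)) = (fun i => q (t.getD i d)) := by
        funext j; simp [Function.comp]
      have hfe2 : ((fun i => (x :: t).getD i d) ∘ (· + 1)) = (fun i => t.getD i d) := by
        funext j; simp [Function.comp]
      rw [hfe, hfe2, ih]

-- find? with pointwise-equal predicates (on members) agrees.
theorem find?_congr_mem {α : Type} (l : List α) (P Q : α → Bool)
    (h : ∀ a ∈ l, P a = Q a) : l.find? P = l.find? Q := by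
  induction l with
  | nil => rfl
  | cons x t ih =>
    rw [List.find?_cons, List.find?_cons, h x (by simp)]
    cases Q x
    · exact ih (fun a ha => h a (by simp [ha]))
    · rfl

theorem portB_eq_canon (dl : List (List (String × String))) (k1 k2 : String) :
    validate_duplicate_two_keys_alt dl k1 k2 = canon dl k1 k2 := by
  show (match (List.range dl.length).find? (fun i =>
      (List.range dl.length).any (fun j =>
        decide (j ≠ i) && (pairOf k1 k2 (dl.getD j []) == pairOf k1 k2 (dl.getD i [])))) with
    | some i => (false, dupMsg k1 k2 (pairOf k1 k2 (dl.getD i [])))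
    | none => (true, "")) = canon dl k1 k2
  have hpred : (List.range dl.length).find? (fun i =>
      (List.range dl.length).any (fun j =>
        decide (j ≠ i) && (pairOf k1 k2 (dl.getD j []) == pairOf k1 k2 (dl.getD i []))))
      = (List.range dl.length).find?
        (fun i => decide (1 < (dl.map (pairOf k1 k2)).count (pairOf k1 k2 (dl.getD i [])))) := by
    apply find?_congr_mem
    intro i hi
    exact any_ne_eq_count dl (pairOf k1 k2) i (List.mem_range.mp hi) []
  rw [hpred]
  have hmap := find?_range_getD dl
    (fun item => decide (1 < (dl.map (pairOf k1 k2)).count (pairOf k1 k2 item))) []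
  unfold canon
  rw [← hmap]
  cases (List.range dl.length).find?
      (fun i => decide (1 < (dl.map (pairOf k1 k2)).count (pairOf k1 k2 (dl.getD i [])))) <;> simp

-- ===== VERDICT (by name: the statement is the Claim_ definition above) =====
theorem validate_duplicate_two_keys_spec : Claim_equal_validate_duplicate_two_keys := by
  intro dl k1 k2 _ _
  unfold Spec_validate_duplicate_two_keys
  rw [portA_eq_canon, portB_eq_canon]
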